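-- pv_equiv track=rewrite | github.com/Badokk/AdventOfCode18 | Python/Day_2/functions.py | createDistanceMap
-- ===== SOURCE A (Python) =====
-- def createDistanceMap(words):
--     distance_map = dict()
--     pivot = words[0]
--     distance_map[0] = [pivot]
--
--     for word in words[1:]:
--         differences = sum(1 for a, b in zip(pivot, word) if a != b)
--         if not differences in distance_map:
--             distance_map[differences] = list()
--         distance_map[differences].append(word)
--     return distance_map
-- ===== SOURCE B (Python) =====
-- def createDistanceMap(words):
--     pivot = words[0]
--     pairs = [(sum(a != b for a, b in zip(pivot, w)), w) for w in words[1:]]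
--     keys = [0]
--     for d, _ in pairs:
--         if d not in keys:
--             keys.append(d)
--     return {d: ([pivot] if d == 0 else []) + [w for d2, w in pairs if d2 == d]
--             for d in keys}
-- ===== Notes on version B (the rewrite author's own statement) =====
-- stated objective: alternative
-- what changed: B replaces A's incremental dict-building loop (membership test + in-place append per word) by a two-phase computation: precompute all (distance, word) pairs, collect the distinct distances in first-occurrence order, then build each group by filtering the pair list.
import Mathlib
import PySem

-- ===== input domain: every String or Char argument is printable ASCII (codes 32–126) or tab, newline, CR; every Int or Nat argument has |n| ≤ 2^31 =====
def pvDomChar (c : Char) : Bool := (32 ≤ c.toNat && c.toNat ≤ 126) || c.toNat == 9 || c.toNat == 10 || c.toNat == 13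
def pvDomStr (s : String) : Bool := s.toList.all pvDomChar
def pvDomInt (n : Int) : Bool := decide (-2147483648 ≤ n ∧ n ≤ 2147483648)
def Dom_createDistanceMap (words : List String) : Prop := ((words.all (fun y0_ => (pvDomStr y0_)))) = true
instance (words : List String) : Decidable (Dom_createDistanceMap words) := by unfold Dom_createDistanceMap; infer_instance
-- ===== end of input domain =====

-- B rebuilds the map by precomputing (distance, word) pairs, deduplicating the keys,
-- and filtering the pairs per key, instead of A's incremental dict mutation; same cost.
-- Pre_ excludes the empty list, on which A raises IndexError (words[0]); B raises there too.
-- ===== PORT A =====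
def createDistanceMap (words : List String) : List (Int × List String) :=
  match PySem.List.pyGet? words 0 with
  | none => []  -- Python raises IndexError here; excluded by Pre_
  | some pivot =>
    let d0 : PySem.Dict Int (List String) := (PySem.Dict.empty).insert 0 [pivot]
    let dfin := (PySem.List.slice words (some 1) none).foldl
      (fun d word =>
        let differences : Int :=
          (pivot.toList.zip word.toList).foldl
            (fun s p => if p.1 ≠ p.2 then s + 1 else s) 0
        let d' := if d.contains differences = false then d.insert differences [] else d
        d'.modify differences [] (fun l => l ++ [word])) d0
    dfin.items

-- ===== PORT B =====
def createDistanceMap_alt (words : List String) : List (Int × List String) :=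
  match PySem.List.pyGet? words 0 with
  | none => []  -- Python raises IndexError here; excluded by Pre_
  | some pivot =>
    let pairs := (PySem.List.slice words (some 1) none).map
      (fun w => (((pivot.toList.zip w.toList).map
                    (fun p => if p.1 ≠ p.2 then (1 : Int) else 0)).sum, w))
    let keys := pairs.foldl (fun ks p => if p.1 ∈ ks then ks else ks ++ [p.1]) [(0 : Int)]
    keys.map (fun d =>
      (d, (if d = 0 then [pivot] else []) ++ (pairs.filter (fun p => p.1 == d)).map (·.2)))

-- ===== PRECONDITION & SPEC =====
-- Pre_ excludes exactly the empty list: there A raises IndexError on words[0] (and so does B).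
def Pre_createDistanceMap (words : List String) : Prop := words ≠ []
instance (words : List String) : Decidable (Pre_createDistanceMap words) := by
  unfold Pre_createDistanceMap; infer_instance
def pvWitness_createDistanceMap : List String := ["ab", "ac", "ab"]
def Spec_createDistanceMap (words : List String) (out : List (Int × List String)) : Prop := out = createDistanceMap_alt words
instance (words : List String) (out : List (Int × List String)) : Decidable (Spec_createDistanceMap words out) := by unfold Spec_createDistanceMap; infer_instance

-- ===== CLAIM (what is proved, stated in full; the proofs are below) =====
def Claim_equal_createDistanceMap : Prop := ∀ (words : List String), Dom_createDistanceMap words → Pre_createDistanceMap words → Spec_createDistanceMap words (createDistanceMap words)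

-- ===== LEMMAS AND PROOFS =====

lemma stepA_eq (d : PySem.Dict Int (List String)) (k : Int) (w : String) :
    (if d.contains k = false then d.insert k [] else d).modify k [] (fun l => l ++ [w])
      = d.modify k [] (fun l => l ++ [w]) := by
  by_cases h : d.contains k = false
  · simp only [h, if_true, PySem.Dict.modify, PySem.Dict.getD_insert_self,
      PySem.Dict.insert_insert_self, PySem.Dict.getD_of_not_contains (h := h)]
  · simp [h]

lemma dist_foldl_eq (l : List (Char × Char)) (c : Int) :
    l.foldl (fun s p => if p.1 ≠ p.2 then s + 1 else s) c
      = c + (l.map (fun p => if p.1 ≠ p.2 then (1 : Int) else 0)).sum := by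
  induction l generalizing c with
  | nil => simp
  | cons x xs ih =>
    simp only [List.foldl_cons, List.map_cons, List.sum_cons, ih]
    by_cases h : x.1 ≠ x.2
    · simp [h]; ring
    · simp [h]

lemma main_eq (pivot : String) (rest : List String) :
    (let d0 : PySem.Dict Int (List String) := (PySem.Dict.empty).insert 0 [pivot]
     let dfin := rest.foldl
      (fun d word =>
        let differences : Int :=
          (pivot.toList.zip word.toList).foldl
            (fun s p => if p.1 ≠ p.2 then s + 1 else s) 0
        let d' := if d.contains differences = false then d.insert differences [] else d
        d'.modify differences [] (fun l => l ++ [word])) d0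
     dfin.items)
    =
    (let pairs := rest.map
      (fun w => (((pivot.toList.zip w.toList).map
                    (fun p => if p.1 ≠ p.2 then (1 : Int) else 0)).sum, w))
     let keys := pairs.foldl (fun ks p => if p.1 ∈ ks then ks else ks ++ [p.1]) [(0 : Int)]
     keys.map (fun d =>
      (d, (if d = 0 then [pivot] else []) ++ (pairs.filter (fun p => p.1 == d)).map (·.2)))) := by
  simp only
  set d0 : PySem.Dict Int (List String) := (PySem.Dict.empty).insert 0 [pivot] with hd0
  set g : String → Int × String := fun w =>
    (((pivot.toList.zip w.toList).map (fun p => if p.1 ≠ p.2 then (1 : Int) else 0)).sum, w) with hg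
  have hA : rest.foldl
      (fun d word =>
        let differences : Int :=
          (pivot.toList.zip word.toList).foldl
            (fun s p => if p.1 ≠ p.2 then s + 1 else s) 0
        let d' := if d.contains differences = false then d.insert differences [] else d
        d'.modify differences [] (fun l => l ++ [word])) d0
      = (rest.map g).foldl (fun d p => d.modify p.1 [] (fun l => l ++ [p.2])) d0 := by
    rw [List.foldl_map]
    have : (fun (d : PySem.Dict Int (List String)) word =>
        let differences : Int :=
          (pivot.toList.zip word.toList).foldl
            (fun s p => if p.1 ≠ p.2 then s + 1 else s) 0
        let d' := if d.contains differences = false then d.insert differences [] else d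
        d'.modify differences [] (fun l => l ++ [word]))
        = (fun (d : PySem.Dict Int (List String)) (w : String) =>
            d.modify (g w).1 [] (fun l => l ++ [(g w).2])) := by
      funext d w
      simp only [hg, dist_foldl_eq, zero_add, stepA_eq]
    rw [this]
  rw [hA]
  set dfin := (rest.map g).foldl (fun d p => d.modify p.1 [] (fun l => l ++ [p.2])) d0 with hdf
  have hnd : dfin.keys.Nodup := by
    rw [hdf]
    exact PySem.Dict.nodup_keys_foldl_modify_key (rest.map g) Prod.fst []
      (fun _ p => fun l => l ++ [p.2]) d0 (by rw [hd0]; rw [PySem.Dict.keys_insert_of_not_contains] <;> simp [PySem.Dict.keys_empty, PySem.Dict.contains_empty])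
  have hkeys : dfin.keys
      = (rest.map g).foldl (fun ks p => if p.1 ∈ ks then ks else ks ++ [p.1]) [(0 : Int)] := by
    rw [hdf, PySem.Dict.keys_foldl_modify_key (rest.map g) Prod.fst []
      (fun _ p => fun l => l ++ [p.2]) d0]
    have : d0.keys = [(0 : Int)] := by rw [hd0]; rw [PySem.Dict.keys_insert_of_not_contains] <;> simp [PySem.Dict.keys_empty, PySem.Dict.contains_empty]
    rw [this]
    rw [show (List.map Prod.fst (rest.map g)) = (rest.map g).map (fun p => p.1) from rfl]
    rw [PySem.Set.update_map_eq_foldl_add]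
    simp only [PySem.Set.add_eq_ite]
  rw [PySem.Dict.items_eq_map_keys dfin hnd [], hkeys]
  apply List.map_congr_left
  intro k _
  have hv : dfin.getD k [] = (if k = 0 then [pivot] else [])
      ++ ((rest.map g).filter (fun p => p.1 == k)).map (·.2) := by
    rw [hdf, PySem.Dict.getD_foldl_modify_append]
    congr 1
    rw [hd0, PySem.Dict.getD_insert]
    by_cases h : k = 0 <;> simp [h]
  rw [hv]

-- ===== VERDICT (by name: the statement is the Claim_ definition above) =====
theorem createDistanceMap_spec : Claim_equal_createDistanceMap := by
  intro words _ hpre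
  unfold Spec_createDistanceMap createDistanceMap createDistanceMap_alt
  cases words with
  | nil => exact absurd rfl hpre
  | cons pivot rest =>
    have h0 : PySem.List.pyGet? (pivot :: rest) 0 = some pivot := by simp [pysem]
    have hsl : PySem.List.slice (pivot :: rest) (some 1) none = rest := by simp [pysem]
    rw [h0, hsl]
    exact main_eq pivot rest
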